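-- pv_equiv track=rewrite | github.com/jcolinpatrick/kryptos | scripts/e_s_124_palimpsest_method.py | grid_column_read
-- ===== SOURCE A (Python) =====
-- def grid_column_read(text, rows, cols):
--     """Read text written row-major into rows×cols grid, reading column-major."""
--     grid_size = rows * cols
--     padded = text[:grid_size] if len(text) >= grid_size else text + "A" * (grid_size - len(text))
--     result = []
--     for c in range(cols):
--         for r in range(rows):
--             idx = r * cols + c
--             if idx < len(padded):
--                 result.append(padded[idx])
--     return "".join(result)
-- ===== SOURCE B (Python) =====
-- def grid_column_read(text, rows, cols):
--     """Transpose-read via a single scatter pass over the input."""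
--     if rows <= 0 or cols <= 0:
--         return ""
--     grid_size = rows * cols
--     padded = (text + "A" * grid_size)[:grid_size]
--     out = [""] * grid_size
--     for i, ch in enumerate(padded):
--         r, c = divmod(i, cols)
--         out[c * rows + r] = ch
--     return "".join(out)
-- ===== Notes on version B (the rewrite author's own statement) =====
-- stated objective: alternative
-- what changed: Replaces A's nested column/row gathering loops (plus two-branch pad/truncate) with a single pad-then-truncate slice and one linear scatter pass over the input that writes each character i to its transposed slot (i%cols)*rows + i//cols.
import Mathlib
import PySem

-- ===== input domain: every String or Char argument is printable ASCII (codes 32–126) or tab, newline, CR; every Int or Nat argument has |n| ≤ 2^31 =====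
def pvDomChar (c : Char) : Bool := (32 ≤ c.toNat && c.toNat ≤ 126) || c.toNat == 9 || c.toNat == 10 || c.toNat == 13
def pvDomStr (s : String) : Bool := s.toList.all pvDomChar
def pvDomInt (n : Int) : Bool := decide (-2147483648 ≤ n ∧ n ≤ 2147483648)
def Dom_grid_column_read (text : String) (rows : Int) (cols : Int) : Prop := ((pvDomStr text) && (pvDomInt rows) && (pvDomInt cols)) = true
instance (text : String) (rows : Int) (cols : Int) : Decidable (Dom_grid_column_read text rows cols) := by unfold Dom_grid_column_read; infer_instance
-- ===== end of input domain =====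

-- B reads the padded grid in one linear scatter pass instead of A's nested column/row gather loops (alternative decomposition, same cost).

-- ===== PORT A =====
def grid_column_read (text : String) (rows : Int) (cols : Int) : String :=
  let grid_size : Int := rows * cols
  let t : List Char := text.toList
  let padded : List Char :=
    if (t.length : Int) ≥ grid_size then PySem.List.slice t none (some grid_size)
    else t ++ PySem.List.pyRepeat ['A'] (grid_size - (t.length : Int))
  let result : List Char :=
    (PySem.List.pyRange 0 cols 1).foldl (fun res c =>
      (PySem.List.pyRange 0 rows 1).foldl (fun res r =>
        let idx := r * cols + c
        -- padded[idx]: the guard 'idx < len(padded)' (with idx ≥ 0 from the ranges) makes pyGetD exact here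
        if idx < (padded.length : Int) then res ++ [PySem.List.pyGetD padded idx 'A'] else res) res) []
  String.ofList result

-- ===== PORT B =====
def grid_column_read_alt (text : String) (rows : Int) (cols : Int) : String :=
  if rows ≤ 0 ∨ cols ≤ 0 then "" else
  let grid_size : Int := rows * cols
  let t : List Char := text.toList
  let padded : List Char := PySem.List.slice (t ++ PySem.List.pyRepeat ['A'] grid_size) none (some grid_size)
  let out : List (List Char) :=
    (PySem.List.enumerate padded 0).foldl (fun out p =>
      -- r, c = divmod(i, cols): cols > 0 here, so floordiv/mod are exact (divmod raises only for cols = 0)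
      let r := PySem.Int.floordiv p.1 cols
      let c := PySem.Int.mod p.1 cols
      -- out[c*rows+r] = ch: the index is always in range, so pySetD is exact
      PySem.List.pySetD out (c * rows + r) [p.2])
      (PySem.List.pyRepeat [([] : List Char)] grid_size)
  String.ofList (PySem.Chars.join [] out)

-- ===== PRECONDITION & SPEC =====
def Spec_grid_column_read (text : String) (rows : Int) (cols : Int) (out : String) : Prop := out = grid_column_read_alt text rows cols
instance (text : String) (rows : Int) (cols : Int) (out : String) : Decidable (Spec_grid_column_read text rows cols out) := by unfold Spec_grid_column_read; infer_instance

-- ===== CLAIM (what is proved, stated in full; the proofs are below) =====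
def Claim_equal_grid_column_read : Prop := ∀ (text : String) (rows : Int) (cols : Int), Dom_grid_column_read text rows cols → Spec_grid_column_read text rows cols (grid_column_read text rows cols)

-- ===== LEMMAS AND PROOFS =====

theorem flat_eq_map {α : Type} (f : Nat → Nat → α) (n : Nat) (hn : 0 < n) :
    ∀ m : Nat, (List.range m).flatMap (fun c => (List.range n).map (fun r => f r c))
      = (List.range (n*m)).map (fun j => f (j % n) (j / n)) := by
  intro m
  induction m with
  | zero => simp
  | succ m ih =>
    rw [List.range_succ, List.flatMap_append, ih, Nat.mul_succ, List.range_add, List.map_append]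
    simp only [List.flatMap_singleton, List.map_map]
    congr 1
    apply List.map_congr_left
    intro r hr
    have hrn : r < n := List.mem_range.mp hr
    simp only [Function.comp_apply]
    rw [Nat.mul_add_mod, Nat.mod_eq_of_lt hrn, Nat.mul_add_div hn, Nat.div_eq_of_lt hrn, Nat.add_zero]

theorem length_foldl_set {α : Type} (f : Nat → Nat) (g : Nat → α) :
    ∀ (l : List Nat) (acc : List α),
      (l.foldl (fun a i => a.set (f i) (g i)) acc).length = acc.length := by
  intro l
  induction l with
  | nil => intro acc; rfl
  | cons hd tl ih => intro acc; rw [List.foldl_cons, ih, List.length_set]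

theorem getElem?_foldl_set_of_ne {α : Type} (f : Nat → Nat) (g : Nat → α) (j : Nat) :
    ∀ (l : List Nat) (acc : List α), (∀ i ∈ l, f i ≠ j) →
      (l.foldl (fun a i => a.set (f i) (g i)) acc)[j]? = acc[j]? := by
  intro l
  induction l with
  | nil => intro acc _; rfl
  | cons hd tl ih =>
    intro acc h
    rw [List.foldl_cons, ih _ (fun i hi => h i (List.mem_cons_of_mem _ hi)),
      List.getElem?_set_ne (h hd (List.mem_cons_self))]

theorem scatter_eq_map {α : Type} (n m : Nat) (hn : 0 < n) (hm : 0 < m) (g : Nat → α) (e : α) :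
    (List.range (n*m)).foldl (fun out i => out.set ((i % m)*n + i / m) (g i)) (List.replicate (n*m) e)
      = (List.range (n*m)).map (fun j => g ((j % n)*m + j / n)) := by
  have hlen : ∀ (l : List Nat) (acc : List α),
      (l.foldl (fun out i => out.set ((i % m)*n + i / m) (g i)) acc).length = acc.length :=
    length_foldl_set (fun i => (i % m)*n + i / m) g
  apply List.ext_getElem?
  intro j
  by_cases hj : j < n*m
  · -- the index i0 that the scatter writes to slot j
    set i0 : Nat := (j % n)*m + j / n with hi0def
    have hjn : j % n < n := Nat.mod_lt _ hn
    have hjd : j / n < m := by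
      rw [Nat.div_lt_iff_lt_mul hn, Nat.mul_comm]; exact hj
    have hi0 : i0 < n*m := by
      calc i0 < (j % n)*m + m := by omega
        _ = ((j % n) + 1)*m := by ring
        _ ≤ n*m := Nat.mul_le_mul_right _ (by omega)
    have hmod : i0 % m = j / n := by
      rw [hi0def, mul_comm, Nat.mul_add_mod, Nat.mod_eq_of_lt hjd]
    have hdiv : i0 / m = j % n := by
      rw [hi0def, mul_comm, Nat.mul_add_div hm, Nat.div_eq_of_lt hjd, Nat.add_zero]
    have hf : (i0 % m)*n + i0 / m = j := by
      rw [hmod, hdiv, mul_comm, Nat.add_comm]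
      exact Nat.mod_add_div j n
    -- split the range at i0
    have hsplit : List.range (n*m) = (List.range i0 ++ [i0]) ++ (List.range (n*m - (i0+1))).map ((i0+1) + ·) := by
      rw [← List.range_succ, ← List.range_add, Nat.add_sub_cancel' hi0]
    conv_lhs => rw [hsplit, List.foldl_append, List.foldl_append]
    have hacclen : ((List.range i0).foldl (fun out i => out.set ((i % m)*n + i / m) (g i)) (List.replicate (n*m) e)).length = n*m := by
      rw [hlen, List.length_replicate]
    rw [List.foldl_cons, List.foldl_nil]
    rw [getElem?_foldl_set_of_ne]
    · rw [hf, List.getElem?_set_self (by rw [hacclen]; exact hj),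
        List.getElem?_map, List.getElem?_range hj]
      rfl
    · intro i hi
      obtain ⟨b, hb, rfl⟩ := List.mem_map.mp hi
      have hbk : b < n*m - (i0+1) := List.mem_range.mp hb
      intro hcon
      -- injectivity of the scatter map on [0, n*m)
      have hilt : i0 + 1 + b < n*m := by omega
      have hd1 : (i0 + 1 + b) / m < n := by rw [Nat.div_lt_iff_lt_mul hm]; exact hilt
      have hd2 : i0 / m < n := by rw [Nat.div_lt_iff_lt_mul hm]; exact hi0
      have e1 : ((i0 + 1 + b) % m * n + (i0 + 1 + b) / m) % n = (i0 + 1 + b) / m := by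
        rw [mul_comm, Nat.mul_add_mod, Nat.mod_eq_of_lt hd1]
      have e2 : (i0 % m * n + i0 / m) % n = i0 / m := by
        rw [mul_comm, Nat.mul_add_mod, Nat.mod_eq_of_lt hd2]
      have hcon' : (i0 + 1 + b) % m * n + (i0 + 1 + b) / m = i0 % m * n + i0 / m := by
        rw [hcon, hf]
      have hdeq : (i0 + 1 + b) / m = i0 / m := by rw [← e1, hcon', e2]
      have hmeq : (i0 + 1 + b) % m = i0 % m := by
        have := hcon'
        rw [hdeq] at this
        exact Nat.eq_of_mul_eq_mul_right hn (by omega)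
      have : i0 + 1 + b = i0 := by
        have h1 := Nat.div_add_mod (i0 + 1 + b) m
        have h2 := Nat.div_add_mod i0 m
        rw [hdeq, hmeq] at h1
        omega
      omega
  · rw [List.getElem?_eq_none (by rw [hlen, List.length_replicate]; omega),
      List.getElem?_eq_none (by simp only [List.length_map, List.length_range]; omega)]

-- ===== VERDICT (by name: the statement is the Claim_ definition above) =====
theorem padded_eq {t : List Char} {g : Nat} :
    (if (t.length : Int) ≥ ((g : Nat) : Int) then PySem.List.slice t none (some ((g:Nat):Int))
     else t ++ PySem.List.pyRepeat ['A'] (((g:Nat):Int) - (t.length : Int)))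
    = t.take g ++ List.replicate (g - t.length) 'A' := by
  by_cases h : (t.length : Int) ≥ ((g:Nat) : Int)
  · rw [if_pos h, PySem.List.slice_to_natCast]
    have h0 : g - t.length = 0 := by omega
    rw [h0, List.replicate_zero, List.append_nil]
  · rw [if_neg h, PySem.List.pyRepeat_singleton]
    have h2 : (((g:Nat):Int) - (t.length:Int)).toNat = g - t.length := by omega
    rw [h2, List.take_of_length_le (by omega)]

theorem padded_alt_eq {t : List Char} {g : Nat} :
    PySem.List.slice (t ++ PySem.List.pyRepeat ['A'] ((g:Nat):Int)) none (some ((g:Nat):Int))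
    = t.take g ++ List.replicate (g - t.length) 'A' := by
  rw [PySem.List.pyRepeat_singleton, Int.toNat_natCast, PySem.List.slice_to_natCast,
    List.take_append, List.take_replicate]
  congr 2
  omega

theorem grid_column_read_spec : Claim_equal_grid_column_read := by
  intro text rows cols _
  unfold Spec_grid_column_read grid_column_read grid_column_read_alt
  by_cases hdeg : rows ≤ 0 ∨ cols ≤ 0
  · rw [if_pos hdeg]
    rcases (by omega : cols ≤ 0 ∨ 0 < cols) with hc | hc
    · rw [PySem.List.pyRange_one_eq_nil hc]
      rfl
    · have hr : rows ≤ 0 := hdeg.resolve_right (by omega)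
      rw [PySem.List.pyRange_one_eq_nil hr]
      simp only [List.foldl_nil, PySem.List.foldl_ignore]
  · rw [if_neg hdeg]
    push Not at hdeg
    obtain ⟨hr, hc⟩ := hdeg
    obtain ⟨n, rfl⟩ : ∃ k : Nat, rows = (k : Int) := ⟨rows.toNat, (Int.toNat_of_nonneg (by omega)).symm⟩
    obtain ⟨m, rfl⟩ : ∃ k : Nat, cols = (k : Int) := ⟨cols.toNat, (Int.toNat_of_nonneg (by omega)).symm⟩
    have hn : 0 < n := by exact_mod_cast hr
    have hm : 0 < m := by exact_mod_cast hc
    simp only [← Nat.cast_mul, padded_eq, padded_alt_eq]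
    set P : List Char := List.take (n*m) text.toList ++ List.replicate (n*m - text.toList.length) 'A' with hPdef
    have hP : P.length = n*m := by
      rw [hPdef, List.length_append, List.length_take, List.length_replicate]; omega
    refine congrArg String.ofList ?_
    have hA : (List.foldl
        (fun res c =>
          List.foldl
            (fun res r =>
              if r * (m:Int) + c < ((P.length : Nat) : Int) then
                res ++ [PySem.List.pyGetD P (r * (m:Int) + c) 'A']
              else res)
            res (PySem.List.pyRange 0 (n:Int) 1))
        [] (PySem.List.pyRange 0 (m:Int) 1))
        = (List.range (n*m)).map (fun j => P.getD ((j % n)*m + j / n) 'A') := by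
      rw [PySem.List.pyRange_zero_natCast, PySem.List.pyRange_zero_natCast,
        List.foldl_map]
      trans (List.foldl (fun (res : List Char) (c : Nat) =>
          res ++ (List.range n).map (fun r => P.getD (r*m + c) 'A')) [] (List.range m))
      · apply PySem.List.foldl_congr_mem'
        intro c hcmem res
        have hcm : c < m := List.mem_range.mp hcmem
        rw [List.foldl_map]
        trans (List.foldl (fun (res : List Char) (r : Nat) =>
            res ++ [P.getD (r*m + c) 'A']) res (List.range n))
        · apply PySem.List.foldl_congr_mem'
          intro r hrmem res'
          have hrn : r < n := List.mem_range.mp hrmem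
          have hcast : (r:Int) * (m:Int) + (c:Int) = ((r*m + c : Nat) : Int) := by push_cast; ring
          have hbound : r*m + c < n*m := by
            calc r*m + c < r*m + m := by omega
              _ = (r+1)*m := by ring
              _ ≤ n*m := Nat.mul_le_mul_right _ (by omega)
          rw [hcast, if_pos (by rw [hP]; exact_mod_cast hbound), PySem.List.pyGetD_natCast]
        · exact PySem.List.foldl_append_singleton_eq_map _ _ _
      · rw [PySem.List.foldl_append_eq_flatMap, List.nil_append]
        exact flat_eq_map (fun r c => P.getD (r*m + c) 'A') n hn m
    rw [hA]
    have hB : (List.foldl (fun out p => PySem.List.pySetD out (PySem.Int.mod p.1 (m:Int) * (n:Int) + PySem.Int.floordiv p.1 (m:Int)) [p.2])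
          (PySem.List.pyRepeat [[]] ((n * m : Nat) : Int))
          (PySem.List.enumerate P))
        = (List.range (n*m)).map (fun j => [P.getD ((j % n)*m + j / n) 'A']) := by
      rw [PySem.List.enumerate_eq_map_pyRange (d := 'A'), PySem.List.len_eq, hP,
        PySem.List.pyRange_zero_natCast, List.map_map, List.foldl_map,
        PySem.List.pyRepeat_singleton, Int.toNat_natCast]
      trans ((List.range (n*m)).foldl (fun out i => out.set ((i % m)*n + i / m) [P.getD i 'A'])
        (List.replicate (n*m) [[]].head!))
      · apply PySem.List.foldl_congr_mem'
        intro i himem out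
        have hilt : i < n*m := List.mem_range.mp himem
        simp only [Function.comp_apply, PySem.Int.mod_natCast, PySem.Int.floordiv_natCast,
          PySem.List.pyGetD_natCast]
        have hcast : ((i % m : Nat) : Int) * (n:Int) + ((i / m : Nat) : Int) = (((i % m)*n + i / m : Nat) : Int) := by
          push_cast; ring
        rw [hcast, PySem.List.pySetD_natCast]
      · exact scatter_eq_map n m hn hm (fun i => [P.getD i 'A']) _
    rw [hB, show (fun j => [P.getD ((j % n)*m + j / n) 'A']) = (fun c => [c]) ∘ (fun j => P.getD ((j % n)*m + j / n) 'A') from rfl,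
      ← List.map_map, PySem.Chars.join_nil_singletons]
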